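-- pv_equiv track=rewrite | github.com/aalok-thakkar/discrete-symbolic-estimation | src/dise/benchmarks/sparse_trie_depth.py | trie_max_depth
-- ===== SOURCE A (Python) =====
-- def trie_max_depth(a: int, b: int, max_depth_cap: int = 16) -> int:
--     """Depth of the deepest descent when inserting ``a`` then ``b`` into a 4-ary trie.
--
--     Both values are decomposed into base-4 digits; we walk the trie
--     until either a new branch is created or a shared prefix ends. The
--     deepest descent depth across the two insertions is returned. We
--     cap the loop at ``max_depth_cap`` to keep concolic execution bounded.
--     """
--     # Determine the digits of `a` and `b` from least- to most-significant.
--     if a < 0 or b < 0: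
--         return 0
--     da = []
--     v = a
--     while v != 0:
--         da.append(v % 4)
--         v = v // 4
--         if len(da) >= max_depth_cap:
--             break
--     db = []
--     v = b
--     while v != 0:
--         db.append(v % 4)
--         v = v // 4
--         if len(db) >= max_depth_cap:
--             break
--     # First insertion: descend from root (depth 0) following digits of `a`.
--     # Each step extends the trie by 1, so depth_a = len(da).
--     depth_a = len(da)
--     # Second insertion: shared prefix length L with `a`, plus one for
--     # the divergence step (capped by len(db) + 1).
--     L = 0
--     while L < len(da) and L < len(db) and da[L] == db[L]:
--         L = L + 1
--     if L == len(db):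
--         depth_b = L  # b is a prefix of a (or equal); ends at depth L
--     else:
--         depth_b = L + 1
--     if depth_a >= depth_b:
--         return depth_a
--     return depth_b
-- ===== SOURCE B (Python) =====
-- def _digits(v, cap):
--     """Base-4 digits of v, least-significant first, capped at cap digits
--     (check after appending, as in the original loop)."""
--     ds = []
--     while v != 0:
--         ds.append(v % 4)
--         v = v // 4
--         if len(ds) >= cap:
--             break
--     return ds
--
--
-- def trie_max_depth(a: int, b: int, max_depth_cap: int = 16) -> int:
--     if a < 0 or b < 0:
--         return 0
--     # Build an explicit 4-ary trie: dict-of-dicts, root empty.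
--     root = {}
--     # Insert a, creating a node per digit; depth_a = steps taken.
--     node = root
--     depth_a = 0
--     for d in _digits(a, max_depth_cap):
--         node = node.setdefault(d, {})
--         depth_a += 1
--     # Descend with b's digits through existing children; a missing
--     # child costs one final step and stops the descent.
--     node = root
--     depth_b = 0
--     for d in _digits(b, max_depth_cap):
--         depth_b += 1
--         if d not in node:
--             break
--         node = node[d]
--     return max(depth_a, depth_b)
-- ===== Notes on version B (the rewrite author's own statement) =====
-- stated objective: alternative
-- what changed: Replaces A's index-based common-prefix-length loop over the two digit lists with an explicit 4-ary trie (dict-of-dicts): insert a's digits creating nodes, then descend with b's digits until a child is missing.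
import Mathlib
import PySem

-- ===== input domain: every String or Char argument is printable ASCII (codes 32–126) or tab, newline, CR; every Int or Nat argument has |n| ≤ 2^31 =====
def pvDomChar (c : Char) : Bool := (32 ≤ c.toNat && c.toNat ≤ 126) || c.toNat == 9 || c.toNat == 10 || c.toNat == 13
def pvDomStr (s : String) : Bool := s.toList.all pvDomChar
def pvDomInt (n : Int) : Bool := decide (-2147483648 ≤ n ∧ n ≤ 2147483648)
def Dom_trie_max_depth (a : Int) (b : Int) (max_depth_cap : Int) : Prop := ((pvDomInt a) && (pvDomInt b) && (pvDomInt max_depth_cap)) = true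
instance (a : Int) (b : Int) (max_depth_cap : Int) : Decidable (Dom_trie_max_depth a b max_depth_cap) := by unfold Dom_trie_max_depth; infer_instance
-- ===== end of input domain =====

-- B builds an explicit 4-ary trie (insert a, then descend with b's digits) instead of
-- A's common-prefix-length loop over the two digit lists; objective: alternative, same cost.

-- ===== PORT A =====
-- A's digit loop: `while v != 0: da.append(v % 4); v //= 4; if len(da) >= cap: break`.
-- v is a Nat here because A only reaches the loop with v ≥ 0 (negative inputs return 0 first);
-- on Nat, % and / agree with Python's % and //.
def digitsA (v : Nat) (len : Nat) (cap : Int) : List Int :=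
  if v = 0 then []
  else if ((len : Int) + 1 ≥ cap) then [((v % 4 : Nat) : Int)]
  else ((v % 4 : Nat) : Int) :: digitsA (v / 4) (len + 1) cap

-- A's `while L < len(da) and L < len(db) and da[L] == db[L]: L += 1`
def prefLenLoop (da db : List Int) (L : Nat) : Nat :=
  if h : L < da.length ∧ L < db.length then
    if da[L]'h.1 = db[L]'h.2 then prefLenLoop da db (L + 1) else L
  else L
termination_by da.length - L

def trie_max_depth (a : Int) (b : Int) (max_depth_cap : Int) : Int :=
  if a < 0 ∨ b < 0 then 0
  else
    let da := digitsA a.toNat 0 max_depth_cap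
    let db := digitsA b.toNat 0 max_depth_cap
    let depth_a : Int := da.length
    let L := prefLenLoop da db 0
    let depth_b : Int := if L = db.length then (L : Int) else (L : Int) + 1
    if depth_a ≥ depth_b then depth_a else depth_b

-- ===== PORT B =====
-- B's `_digits` helper (same loop shape as A's inline loops, per Source B).
def digitsB (v : Nat) (len : Nat) (cap : Int) : List Int :=
  if v = 0 then []
  else if ((len : Int) + 1 ≥ cap) then [((v % 4 : Nat) : Int)]
  else ((v % 4 : Nat) : Int) :: digitsB (v / 4) (len + 1) cap

-- An explicit 4-ary trie; `nil` = absent child, `node` = a dict with four (possibly absent) children.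
inductive Trie4 : Type
  | nil : Trie4
  | node : Trie4 → Trie4 → Trie4 → Trie4 → Trie4
deriving DecidableEq, Repr

-- `node[d]` / `d in node`
def Trie4.child : Trie4 → Int → Trie4
  | .nil, _ => .nil
  | .node c0 c1 c2 c3, d =>
      if d = 0 then c0 else if d = 1 then c1 else if d = 2 then c2 else c3

def Trie4.setChild : Trie4 → Int → Trie4 → Trie4
  | .nil, _, _ => .nil  -- unreachable: we only set children of existing nodes
  | .node c0 c1 c2 c3, d, c =>
      if d = 0 then .node c c1 c2 c3
      else if d = 1 then .node c0 c c2 c3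
      else if d = 2 then .node c0 c1 c c3
      else .node c0 c1 c2 c

-- B's first loop: `node = node.setdefault(d, {})` for each digit of a.
def Trie4.insert : Trie4 → List Int → Trie4
  | t, [] => t
  | t, d :: ds =>
      let c := match t.child d with
        | .nil => Trie4.node .nil .nil .nil .nil
        | c => c
      t.setChild d (c.insert ds)

-- B's second loop: count a step per digit, stop after the first missing child.
def Trie4.descend : Trie4 → List Int → Int
  | _, [] => 0
  | t, d :: ds =>
      match t.child d with
      | .nil => 1
      | c => 1 + c.descend ds

def trie_max_depth_alt (a : Int) (b : Int) (max_depth_cap : Int) : Int :=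
  if a < 0 ∨ b < 0 then 0
  else
    let root := Trie4.node .nil .nil .nil .nil
    let da := digitsB a.toNat 0 max_depth_cap
    let db := digitsB b.toNat 0 max_depth_cap
    let t := root.insert da
    let depth_a : Int := da.length  -- the counter increments once per digit of a
    let depth_b : Int := t.descend db
    max depth_a depth_b

-- ===== PRECONDITION & SPEC =====
def Spec_trie_max_depth (a : Int) (b : Int) (max_depth_cap : Int) (out : Int) : Prop := out = trie_max_depth_alt a b max_depth_cap
instance (a : Int) (b : Int) (max_depth_cap : Int) (out : Int) : Decidable (Spec_trie_max_depth a b max_depth_cap out) := by unfold Spec_trie_max_depth; infer_instance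

-- ===== CLAIM (what is proved, stated in full; the proofs are below) =====
def Claim_equal_trie_max_depth : Prop := ∀ (a : Int) (b : Int) (max_depth_cap : Int), Dom_trie_max_depth a b max_depth_cap → Spec_trie_max_depth a b max_depth_cap (trie_max_depth a b max_depth_cap)

-- ===== LEMMAS AND PROOFS =====

theorem digitsA_eq_digitsB : ∀ (v len : Nat) (cap : Int), digitsA v len cap = digitsB v len cap := by
  intro v
  induction v using Nat.strong_induction_on with
  | _ v ih =>
    intro len cap
    rw [digitsA.eq_def, digitsB.eq_def]
    split_ifs with h1 h2
    · rfl
    · rfl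
    · rw [ih (v / 4) (Nat.div_lt_self (Nat.pos_of_ne_zero h1) (by norm_num))]

theorem digits_range : ∀ (v len : Nat) (cap : Int) (d : Int),
    d ∈ digitsA v len cap → 0 ≤ d ∧ d < 4 := by
  intro v
  induction v using Nat.strong_induction_on with
  | _ v ih =>
    intro len cap d hmem
    rw [digitsA.eq_def] at hmem
    split_ifs at hmem with h1 h2
    · simp at hmem
    · simp at hmem; subst hmem
      exact ⟨Int.natCast_nonneg _, by exact_mod_cast Nat.mod_lt _ (by norm_num)⟩
    · rcases List.mem_cons.mp hmem with h | h
      · subst h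
        exact ⟨Int.natCast_nonneg _, by exact_mod_cast Nat.mod_lt _ (by norm_num)⟩
      · exact ih (v / 4) (Nat.div_lt_self (Nat.pos_of_ne_zero h1) (by norm_num)) (len + 1) cap d h

-- structural common-prefix length (proof-side characterisation of A's L loop)
def pref : List Int → List Int → Nat
  | x :: xs, y :: ys => if x = y then pref xs ys + 1 else 0
  | _, _ => 0

theorem pref_nil_right (xs : List Int) : pref xs [] = 0 := by cases xs <;> simp [pref]

theorem prefLenLoop_eq : ∀ (xs ys : List Int) (L : Nat),
    prefLenLoop xs ys L = L + pref (xs.drop L) (ys.drop L) := by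
  intro xs ys L
  fun_induction prefLenLoop xs ys L with
  | case1 L h heq ih =>
      rw [List.drop_eq_getElem_cons h.1, List.drop_eq_getElem_cons h.2]
      rw [pref, if_pos heq, ih]
      omega
  | case2 L h heq =>
      rw [List.drop_eq_getElem_cons h.1, List.drop_eq_getElem_cons h.2]
      rw [pref, if_neg heq]
      omega
  | case3 L h =>
      rcases not_and_or.mp h with h' | h'
      · rw [List.drop_eq_nil_of_le (show xs.length ≤ L by omega)]
        cases ys.drop L <;> simp [pref]
      · rw [show ys.drop L = [] from List.drop_eq_nil_of_le (by omega), pref_nil_right]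
        omega

def trieRoot : Trie4 := Trie4.node .nil .nil .nil .nil

theorem child_root (y : Int) : trieRoot.child y = Trie4.nil := by
  simp only [trieRoot, Trie4.child]; split_ifs <;> rfl

theorem insert_node_ne_nil (c0 c1 c2 c3 : Trie4) (ds : List Int) :
    (Trie4.node c0 c1 c2 c3).insert ds ≠ Trie4.nil := by
  cases ds with
  | nil => simp [Trie4.insert]
  | cons d ds =>
      simp only [Trie4.insert, Trie4.setChild]
      split_ifs <;> simp

theorem child_setChild_root (x y : Int) (t : Trie4)
    (hx : 0 ≤ x ∧ x < 4) (hy : 0 ≤ y ∧ y < 4) :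
    (trieRoot.setChild x t).child y = if y = x then t else Trie4.nil := by
  obtain ⟨hx0, hx4⟩ := hx
  obtain ⟨hy0, hy4⟩ := hy
  interval_cases x <;> interval_cases y <;>
    simp [trieRoot, Trie4.setChild, Trie4.child]

theorem descend_insert : ∀ (ys xs : List Int),
    (∀ d ∈ xs, 0 ≤ d ∧ d < 4) → (∀ d ∈ ys, 0 ≤ d ∧ d < 4) →
    (trieRoot.insert xs).descend ys
      = (if pref xs ys = ys.length then (pref xs ys : Int) else (pref xs ys : Int) + 1) := by
  intro ys
  induction ys with
  | nil =>
      intro xs _ _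
      have h0 : pref xs [] = 0 := pref_nil_right xs
      simp [Trie4.descend, h0]
  | cons y ys ih =>
      intro xs hxs hys
      cases xs with
      | nil =>
          simp only [Trie4.insert, Trie4.descend, child_root]
          simp [pref]
      | cons x xs' =>
          have hx : 0 ≤ x ∧ x < 4 := hxs x (by simp)
          have hy : 0 ≤ y ∧ y < 4 := hys y (by simp)
          have hchild : trieRoot.child x = Trie4.nil := child_root x
          have hins : trieRoot.insert (x :: xs')
              = trieRoot.setChild x (trieRoot.insert xs') := by
            show trieRoot.setChild x
                ((match trieRoot.child x with
                  | .nil => Trie4.node .nil .nil .nil .nil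
                  | c => c).insert xs') = _
            rw [hchild]
            exact rfl
          rw [hins]
          by_cases hxy : y = x
          · subst hxy
            have hc : (trieRoot.setChild y (trieRoot.insert xs')).child y
                = trieRoot.insert xs' := by
              rw [child_setChild_root y y _ hx hy]; simp
            have hne : trieRoot.insert xs' ≠ Trie4.nil :=
              insert_node_ne_nil _ _ _ _ xs'
            have hrec : (trieRoot.setChild y (trieRoot.insert xs')).descend (y :: ys)
                = 1 + (trieRoot.insert xs').descend ys := by
              rw [Trie4.descend]
              rw [hc]
              cases htr : trieRoot.insert xs' with
              | nil => exact absurd htr hne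
              | node c0 c1 c2 c3 => simp
            rw [hrec, ih xs' (fun d hd => hxs d (by simp [hd])) (fun d hd => hys d (by simp [hd]))]
            have hpref : pref (y :: xs') (y :: ys) = pref xs' ys + 1 := by simp [pref]
            rw [hpref]
            simp only [List.length_cons]
            by_cases hl : pref xs' ys = ys.length
            · rw [if_pos hl, if_pos (by omega)]; push_cast; ring
            · rw [if_neg hl, if_neg (by omega)]; push_cast; ring
          · have hc : (trieRoot.setChild x (trieRoot.insert xs')).child y = Trie4.nil := by
              rw [child_setChild_root x y _ hx hy]; simp [hxy]
            rw [Trie4.descend, hc]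
            have hpref : pref (x :: xs') (y :: ys) = 0 := by
              simp [pref, show x ≠ y from fun h => hxy h.symm]
            rw [hpref]
            simp

-- ===== VERDICT (by name: the statement is the Claim_ definition above) =====
theorem trie_max_depth_spec : Claim_equal_trie_max_depth := by
  intro a b cap _
  unfold Spec_trie_max_depth trie_max_depth trie_max_depth_alt
  by_cases hneg : a < 0 ∨ b < 0
  · simp [hneg]
  · simp only [if_neg hneg]
    rw [← digitsA_eq_digitsB, ← digitsA_eq_digitsB]
    set da := digitsA a.toNat 0 cap with hda
    set db := digitsA b.toNat 0 cap with hdb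
    have hra : ∀ d ∈ da, 0 ≤ d ∧ d < 4 := fun d hd => digits_range _ _ _ d hd
    have hrb : ∀ d ∈ db, 0 ≤ d ∧ d < 4 := fun d hd => digits_range _ _ _ d hd
    have hdesc := descend_insert db da hra hrb
    have hL : prefLenLoop da db 0 = pref da db := by
      rw [prefLenLoop_eq]; simp
    rw [hL]
    rw [show Trie4.node .nil .nil .nil .nil = trieRoot from rfl, hdesc]
    by_cases hl : pref da db = db.length
    · simp only [if_pos hl]
      omega
    · simp only [if_neg hl]
      omega
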